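-- pv_equiv track=rewrite | github.com/OnDefend/Dyna-Defcon-33 | core/keyboard_cache_analyzer.py | _is_cache_disabled_input_type
-- ===== SOURCE A (Python) =====
-- def _is_cache_disabled_input_type(input_type_str: str) -> bool:
--     """Check if input type disables keyboard cache."""
--     try:
--         input_type = int(input_type_str)
--
--         # Check for secure input type flags
--         # These constants match Android InputType flags
--         TYPE_TEXT_VARIATION_PASSWORD = 0x00000080
--         TYPE_TEXT_VARIATION_VISIBLE_PASSWORD = 0x00000090
--         TYPE_NUMBER_VARIATION_PASSWORD = 0x00000010
--         TYPE_TEXT_VARIATION_WEB_PASSWORD = 0x000000e0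
--         TYPE_TEXT_FLAG_NO_SUGGESTIONS = 0x00080000
--
--         secure_flags = [
--             TYPE_TEXT_VARIATION_PASSWORD,
--             TYPE_TEXT_VARIATION_VISIBLE_PASSWORD,
--             TYPE_NUMBER_VARIATION_PASSWORD,
--             TYPE_TEXT_VARIATION_WEB_PASSWORD,
--             TYPE_TEXT_FLAG_NO_SUGGESTIONS
--         ]
--
--         for flag in secure_flags:
--             if (input_type & flag) != 0:
--                 return True
--
--         return False
--
--     except (ValueError, TypeError):
--         return False
-- ===== SOURCE B (Python) =====
-- # B: no bitwise operations at all — the five secure flags together occupy exactly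
-- # hex nibble 1 (bits 4-7) and bit 19, so B extracts those positions with
-- # floor-division/modulo digit arithmetic instead of scanning a flag list with '&'.
-- def _is_cache_disabled_input_type(input_type_str: str) -> bool:
--     """Check if input type disables keyboard cache."""
--     try:
--         n = int(input_type_str)
--     except (ValueError, TypeError):
--         return False
--     # secure variations live in the second hex digit; NO_SUGGESTIONS is bit 19
--     return (n // 16) % 16 != 0 or (n // 524288) % 2 == 1
-- ===== Notes on version B (the rewrite author's own statement) =====
-- stated objective: alternative
-- what changed: B uses no bitwise operations: instead of scanning a list of five flag masks with bitwise AND, it extracts the second hexadecimal digit (bits 4-7, which the four password variations jointly cover) and bit 19 (NO_SUGGESTIONS) by floor-division/modulo arithmetic and tests those two positions; int() parsing and the except-returns-False path are unchanged.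
import Mathlib
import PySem

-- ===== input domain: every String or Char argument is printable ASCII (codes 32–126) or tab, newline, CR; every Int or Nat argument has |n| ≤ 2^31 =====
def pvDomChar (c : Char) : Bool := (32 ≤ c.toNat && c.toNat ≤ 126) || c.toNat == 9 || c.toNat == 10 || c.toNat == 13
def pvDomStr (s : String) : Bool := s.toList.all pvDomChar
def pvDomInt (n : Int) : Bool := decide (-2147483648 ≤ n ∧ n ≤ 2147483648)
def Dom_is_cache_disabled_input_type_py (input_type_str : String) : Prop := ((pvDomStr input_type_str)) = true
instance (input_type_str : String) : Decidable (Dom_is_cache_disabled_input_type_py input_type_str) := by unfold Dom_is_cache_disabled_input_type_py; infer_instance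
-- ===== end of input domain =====

-- B replaces A's bitmask scan over five flags with pure digit arithmetic: it extracts the second hex nibble (bits 4-7) and bit 19 via floor-division/modulo and tests those; same int() parsing and except-returns-False path.


-- ===== PORT A =====
-- try: int(input_type_str) — PySem.Int.ofStr? returns none exactly on the ValueError/TypeError path, where A returns False.
-- The for-loop with early `return True` over the flags list is List.any over the same list.
def is_cache_disabled_input_type_py (input_type_str : String) : Bool :=
  match PySem.Int.ofStr? input_type_str with
  | none => false
  | some input_type =>
    let secure_flags : List Int := [0x00000080, 0x00000090, 0x00000010, 0x000000e0, 0x00080000]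
    secure_flags.any (fun flag => PySem.Int.band input_type flag != 0)

-- ===== PORT B =====
-- `(n // 16) % 16 != 0 or (n // 524288) % 2 == 1`, with // and % as Python floor division/modulo.
def is_cache_disabled_input_type_py_alt (input_type_str : String) : Bool :=
  match PySem.Int.ofStr? input_type_str with
  | none => false
  | some n =>
    (PySem.Int.mod (PySem.Int.floordiv n 16) 16 != 0) ||
    (PySem.Int.mod (PySem.Int.floordiv n 524288) 2 == 1)

-- ===== PRECONDITION & SPEC =====
def Spec_is_cache_disabled_input_type_py (input_type_str : String) (out : Bool) : Prop := out = is_cache_disabled_input_type_py_alt input_type_str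
instance (input_type_str : String) (out : Bool) : Decidable (Spec_is_cache_disabled_input_type_py input_type_str out) := by unfold Spec_is_cache_disabled_input_type_py; infer_instance

-- ===== CLAIM (what is proved, stated in full; the proofs are below) =====
def Claim_equal_is_cache_disabled_input_type_py : Prop := ∀ (input_type_str : String), Dom_is_cache_disabled_input_type_py input_type_str → Spec_is_cache_disabled_input_type_py input_type_str (is_cache_disabled_input_type_py input_type_str)

-- ===== LEMMAS AND PROOFS =====

-- x masked by an OR of masks is zero iff it is zero on each mask.
theorem pv_and_or_eq_zero (x a b : Nat) : x &&& (a ||| b) = 0 ↔ (x &&& a = 0 ∧ x &&& b = 0) := by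
  constructor
  · intro h
    constructor <;> apply Nat.eq_of_testBit_eq <;> intro i <;>
      have := congrArg (fun t => t.testBit i) h <;>
      simp [Nat.testBit_and, Nat.testBit_or] at this ⊢ <;> tauto
  · rintro ⟨h1, h2⟩
    apply Nat.eq_of_testBit_eq; intro i
    have t1 := congrArg (fun t => t.testBit i) h1
    have t2 := congrArg (fun t => t.testBit i) h2
    simp [Nat.testBit_and, Nat.testBit_or] at t1 t2 ⊢
    tauto

-- an OR of masks is contained in x iff each mask is contained in x.
theorem pv_or_and_eq_self (x a b : Nat) : (a ||| b) &&& x = a ||| b ↔ (a &&& x = a ∧ b &&& x = b) := by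
  constructor
  · intro h
    constructor <;> apply Nat.eq_of_testBit_eq <;> intro i <;>
      have := congrArg (fun t => t.testBit i) h <;>
      simp [Nat.testBit_and, Nat.testBit_or] at this ⊢ <;> tauto
  · rintro ⟨h1, h2⟩
    apply Nat.eq_of_testBit_eq; intro i
    have t1 := congrArg (fun t => t.testBit i) h1
    have t2 := congrArg (fun t => t.testBit i) h2
    simp [Nat.testBit_and, Nat.testBit_or] at t1 t2 ⊢
    tauto

theorem pv_mask_split : (524528 : Nat) = 128 ||| (144 ||| (16 ||| (224 ||| 524288))) := by decide

-- key: the five individual flag tests are together equivalent to the combined-mask test.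
theorem pv_key (n : Int) :
    (PySem.Int.band n 128 ≠ 0 ∨ PySem.Int.band n 144 ≠ 0 ∨ PySem.Int.band n 16 ≠ 0 ∨
     PySem.Int.band n 224 ≠ 0 ∨ PySem.Int.band n 524288 ≠ 0) ↔ PySem.Int.band n 524528 ≠ 0 := by
  by_cases hn : 0 ≤ n
  · simp only [PySem.Int.band, if_pos hn, if_pos (by norm_num : (0:Int) ≤ 128),
      if_pos (by norm_num : (0:Int) ≤ 144), if_pos (by norm_num : (0:Int) ≤ 16),
      if_pos (by norm_num : (0:Int) ≤ 224), if_pos (by norm_num : (0:Int) ≤ 524288),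
      if_pos (by norm_num : (0:Int) ≤ 524528),
      show (128:Int).toNat = 128 from rfl, show (144:Int).toNat = 144 from rfl,
      show (16:Int).toNat = 16 from rfl, show (224:Int).toNat = 224 from rfl,
      show (524288:Int).toNat = 524288 from rfl, show (524528:Int).toNat = 524528 from rfl,
      ne_eq, Int.natCast_eq_zero]
    have h0 : n.toNat &&& 524528 = 0 ↔
        (n.toNat &&& 128 = 0 ∧ (n.toNat &&& 144 = 0 ∧ (n.toNat &&& 16 = 0 ∧
         (n.toNat &&& 224 = 0 ∧ n.toNat &&& 524288 = 0)))) := by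
      rw [pv_mask_split, pv_and_or_eq_zero, pv_and_or_eq_zero, pv_and_or_eq_zero, pv_and_or_eq_zero]
    rw [h0]
    constructor
    · rintro (h|h|h|h|h) hc
      · exact h hc.1
      · exact h hc.2.1
      · exact h hc.2.2.1
      · exact h hc.2.2.2.1
      · exact h hc.2.2.2.2
    · intro h
      by_contra hall
      simp only [not_or, not_not] at hall
      exact h ⟨hall.1, hall.2.1, hall.2.2.1, hall.2.2.2.1, hall.2.2.2.2⟩
  · simp only [PySem.Int.band, if_neg hn, if_pos (by norm_num : (0:Int) ≤ 128),
      if_pos (by norm_num : (0:Int) ≤ 144), if_pos (by norm_num : (0:Int) ≤ 16),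
      if_pos (by norm_num : (0:Int) ≤ 224), if_pos (by norm_num : (0:Int) ≤ 524288),
      if_pos (by norm_num : (0:Int) ≤ 524528),
      show (128:Int).toNat = 128 from rfl, show (144:Int).toNat = 144 from rfl,
      show (16:Int).toNat = 16 from rfl, show (224:Int).toNat = 224 from rfl,
      show (524288:Int).toNat = 524288 from rfl, show (524528:Int).toNat = 524528 from rfl,
      ne_eq, Int.natCast_eq_zero]
    set k := (-n - 1).toNat with hk
    have hfull : (524528 : Nat) &&& k = 524528 ↔
        ((128:Nat) &&& k = 128 ∧ ((144:Nat) &&& k = 144 ∧ ((16:Nat) &&& k = 16 ∧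
          ((224:Nat) &&& k = 224 ∧ (524288:Nat) &&& k = 524288)))) := by
      rw [pv_mask_split, pv_or_and_eq_self, pv_or_and_eq_self, pv_or_and_eq_self, pv_or_and_eq_self]
    have l1 : (128:Nat) &&& k ≤ 128 := Nat.and_le_left
    have l2 : (144:Nat) &&& k ≤ 144 := Nat.and_le_left
    have l3 : (16:Nat) &&& k ≤ 16 := Nat.and_le_left
    have l4 : (224:Nat) &&& k ≤ 224 := Nat.and_le_left
    have l5 : (524288:Nat) &&& k ≤ 524288 := Nat.and_le_left
    have l6 : (524528:Nat) &&& k ≤ 524528 := Nat.and_le_left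
    have e1 : 128 - ((128:Nat) &&& k) = 0 ↔ (128:Nat) &&& k = 128 := by omega
    have e2 : 144 - ((144:Nat) &&& k) = 0 ↔ (144:Nat) &&& k = 144 := by omega
    have e3 : 16 - ((16:Nat) &&& k) = 0 ↔ (16:Nat) &&& k = 16 := by omega
    have e4 : 224 - ((224:Nat) &&& k) = 0 ↔ (224:Nat) &&& k = 224 := by omega
    have e5 : 524288 - ((524288:Nat) &&& k) = 0 ↔ (524288:Nat) &&& k = 524288 := by omega
    have e6 : 524528 - ((524528:Nat) &&& k) = 0 ↔ (524528:Nat) &&& k = 524528 := by omega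
    rw [e1, e2, e3, e4, e5, e6, hfull]
    constructor
    · rintro (h|h|h|h|h) hc
      · exact h hc.1
      · exact h hc.2.1
      · exact h hc.2.2.1
      · exact h hc.2.2.2.1
      · exact h hc.2.2.2.2
    · intro h
      by_contra hall
      simp only [not_or, not_not] at hall
      exact h ⟨hall.1, hall.2.1, hall.2.2.1, hall.2.2.2.1, hall.2.2.2.2⟩

-- the combined mask has exactly bits 4,5,6,7,19 set.
theorem pv_mask_testBit (i : Nat) :
    (524528 : Nat).testBit i = decide (i = 4 ∨ i = 5 ∨ i = 6 ∨ i = 7 ∨ i = 19) := by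
  by_cases h : i < 20
  · interval_cases i <;> decide
  · have h20 : (2 : Nat) ^ 20 ≤ 2 ^ i := Nat.pow_le_pow_right (by norm_num) (by omega)
    have hlt : (524528 : Nat) < 2 ^ i := lt_of_lt_of_le (by norm_num) h20
    have hni : ¬(i = 4 ∨ i = 5 ∨ i = 6 ∨ i = 7 ∨ i = 19) := by omega
    rw [Nat.testBit_lt_two_pow hlt]
    simp [hni]

-- m has no combined-mask bit set iff its second hex nibble and its bit 19 (as digits) are zero.
theorem pvN1 (m : Nat) : m &&& 524528 = 0 ↔ (m / 16 % 16 = 0 ∧ m / 524288 % 2 = 0) := by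
  have hz : m &&& 524528 = 0 ↔ ∀ i : Nat, (m &&& 524528).testBit i = false := by
    constructor
    · intro h i; rw [h]; exact Nat.zero_testBit i
    · intro h; exact Nat.eq_of_testBit_eq (fun i => by rw [h i, Nat.zero_testBit])
  rw [hz]
  have hb : ∀ i : Nat, (m &&& 524528).testBit i =
      (m.testBit i && decide (i = 4 ∨ i = 5 ∨ i = 6 ∨ i = 7 ∨ i = 19)) := by
    intro i; rw [Nat.testBit_and, pv_mask_testBit]
  constructor
  · intro h
    have t4 : m.testBit 4 = false := by have := h 4; rw [hb] at this; simpa using this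
    have t5 : m.testBit 5 = false := by have := h 5; rw [hb] at this; simpa using this
    have t6 : m.testBit 6 = false := by have := h 6; rw [hb] at this; simpa using this
    have t7 : m.testBit 7 = false := by have := h 7; rw [hb] at this; simpa using this
    have t19 : m.testBit 19 = false := by have := h 19; rw [hb] at this; simpa using this
    rw [Nat.testBit_eq_decide_div_mod_eq] at t4 t5 t6 t7 t19
    simp only [decide_eq_false_iff_not] at t4 t5 t6 t7 t19
    norm_num at t4 t5 t6 t7 t19
    omega
  · intro h i
    rw [hb]
    by_cases hi : i = 4 ∨ i = 5 ∨ i = 6 ∨ i = 7 ∨ i = 19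
    · have hbit : m.testBit i = false := by
        rw [Nat.testBit_eq_decide_div_mod_eq]
        simp only [decide_eq_false_iff_not]
        rcases hi with h'|h'|h'|h'|h' <;> subst h' <;> norm_num <;> omega
      rw [hbit]; simp
    · simp [hi]

-- k contains every combined-mask bit iff its second hex nibble is 15 and its bit 19 is set.
theorem pvN2 (k : Nat) : 524528 &&& k = 524528 ↔ (k / 16 % 16 = 15 ∧ k / 524288 % 2 = 1) := by
  have hz : 524528 &&& k = 524528 ↔ ∀ i : Nat, (524528 &&& k).testBit i = (524528 : Nat).testBit i := by
    constructor
    · intro h i; rw [h]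
    · intro h; exact Nat.eq_of_testBit_eq h
  rw [hz]
  have hb : ∀ i : Nat, ((524528 &&& k).testBit i = (524528 : Nat).testBit i) ↔
      ((decide (i = 4 ∨ i = 5 ∨ i = 6 ∨ i = 7 ∨ i = 19) && k.testBit i) =
        decide (i = 4 ∨ i = 5 ∨ i = 6 ∨ i = 7 ∨ i = 19)) := by
    intro i; rw [Nat.testBit_and, pv_mask_testBit]
  constructor
  · intro h
    have t4 : k.testBit 4 = true := by have := (hb 4).mp (h 4); simpa using this
    have t5 : k.testBit 5 = true := by have := (hb 5).mp (h 5); simpa using this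
    have t6 : k.testBit 6 = true := by have := (hb 6).mp (h 6); simpa using this
    have t7 : k.testBit 7 = true := by have := (hb 7).mp (h 7); simpa using this
    have t19 : k.testBit 19 = true := by have := (hb 19).mp (h 19); simpa using this
    rw [Nat.testBit_eq_decide_div_mod_eq] at t4 t5 t6 t7 t19
    simp only [decide_eq_true_eq] at t4 t5 t6 t7 t19
    norm_num at t4 t5 t6 t7 t19
    omega
  · intro h i
    rw [hb]
    by_cases hi : i = 4 ∨ i = 5 ∨ i = 6 ∨ i = 7 ∨ i = 19
    · have hbit : k.testBit i = true := by
        rw [Nat.testBit_eq_decide_div_mod_eq]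
        simp only [decide_eq_true_eq]
        rcases hi with h'|h'|h'|h'|h' <;> subst h' <;> norm_num <;> omega
      rw [hbit]; simp
    · simp [hi]

-- bridge: the combined-mask test equals B's two arithmetic digit tests, for every Int.
theorem pv_band_digits (n : Int) :
    PySem.Int.band n 524528 ≠ 0 ↔
      (PySem.Int.mod (PySem.Int.floordiv n 16) 16 ≠ 0 ∨
       PySem.Int.mod (PySem.Int.floordiv n 524288) 2 = 1) := by
  rw [PySem.Int.floordiv_eq_ediv_of_pos (by norm_num : (0:Int) < 16),
      PySem.Int.floordiv_eq_ediv_of_pos (by norm_num : (0:Int) < 524288),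
      PySem.Int.mod_eq_emod_of_pos (by norm_num : (0:Int) < 16),
      PySem.Int.mod_eq_emod_of_pos (by norm_num : (0:Int) < 2)]
  by_cases hn : 0 ≤ n
  · rw [PySem.Int.band, if_pos hn, if_pos (by norm_num : (0:Int) ≤ 524528)]
    rw [show (524528:Int).toNat = 524528 from rfl]
    have h1 := pvN1 n.toNat
    simp only [ne_eq, Int.natCast_eq_zero]
    omega
  · rw [PySem.Int.band, if_neg hn, if_pos (by norm_num : (0:Int) ≤ 524528)]
    rw [show (524528:Int).toNat = 524528 from rfl]
    have hle : (524528:Nat) &&& (-n - 1).toNat ≤ 524528 := Nat.and_le_left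
    have h2 := pvN2 (-n - 1).toNat
    simp only [ne_eq, Int.natCast_eq_zero]
    omega

-- ===== VERDICT (by name: the statement is the Claim_ definition above) =====
theorem is_cache_disabled_input_type_py_spec : Claim_equal_is_cache_disabled_input_type_py := by
  intro s _
  unfold Spec_is_cache_disabled_input_type_py is_cache_disabled_input_type_py is_cache_disabled_input_type_py_alt
  cases h : PySem.Int.ofStr? s with
  | none => rfl
  | some n =>
    simp only [List.any_cons, List.any_nil, Bool.or_false]
    rw [Bool.eq_iff_iff]
    simp only [Bool.or_eq_true, bne_iff_ne, ne_eq, beq_iff_eq]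
    have hkey := pv_key n
    have hdig := pv_band_digits n
    simp only [ne_eq] at hkey hdig
    rw [← hdig, ← hkey]
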